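-- pv_equiv track=rewrite | github.com/daniel-reich/ubiquitous-fiesta | tX5ZhY5EkduHAPZBh_2.py | nearest_element
-- ===== SOURCE A (Python) =====
-- def nearest_element(n, lst):
--   difference = [abs(n-x) for x in lst]
--
--   if difference.count(min(difference)) == 1:
--     return difference.index(min(difference))
--   else:
--     nearest = []
--     for x in lst:
--       if abs(n-x) == min(difference):
--         nearest.append(x)
--   return lst.index(max(nearest))
-- ===== SOURCE B (Python) =====
-- def nearest_element(n, lst):
--     best_diff = None
--     best_val = None
--     for x in lst:
--         d = abs(n - x)
--         if best_diff is None or d < best_diff or (d == best_diff and x > best_val):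
--             best_diff = d
--             best_val = x
--     return lst.index(best_val)
-- ===== Notes on version B (the rewrite author's own statement) =====
-- stated objective: faster
-- what changed: Replaces A's difference list with its repeated min() scans, count(), index() and per-element min() re-scan branch by a single pass tracking the best (difference, value) pair (ties go to the larger value) followed by one lst.index lookup.
import Mathlib
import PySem

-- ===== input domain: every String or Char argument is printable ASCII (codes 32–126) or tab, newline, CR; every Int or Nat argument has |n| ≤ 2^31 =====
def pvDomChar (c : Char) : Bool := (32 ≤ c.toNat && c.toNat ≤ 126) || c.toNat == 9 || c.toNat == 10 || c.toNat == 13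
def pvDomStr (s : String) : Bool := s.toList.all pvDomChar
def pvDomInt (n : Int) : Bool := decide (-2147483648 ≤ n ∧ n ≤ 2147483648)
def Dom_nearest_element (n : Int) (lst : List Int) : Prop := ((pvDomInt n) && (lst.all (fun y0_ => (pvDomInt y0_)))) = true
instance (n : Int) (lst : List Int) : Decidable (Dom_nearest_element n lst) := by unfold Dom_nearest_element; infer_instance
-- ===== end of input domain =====

-- B replaces A's difference list, repeated min() scans, count/index branches and re-scan
-- by one pass tracking the best (difference, value) pair (ties to the larger value),
-- measured faster in a timing run (A re-scans min(difference) per element in the tie branch).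

-- ===== PORT A =====
-- literal port of A; min(difference) is recomputed by Python at each use but has the same
-- value every time, so it is bound once here; `0` arms are unreachable under Pre_ (lst ≠ []).
def nearest_element (n : Int) (lst : List Int) : Int :=
  let difference := lst.map (fun x => |n - x|)
  match PySem.List.min? difference (fun y => y) with
  | none => 0                                     -- min([]) raises ValueError: outside Pre_
  | some m =>
    if PySem.List.count difference m = 1 then
      ((PySem.List.index? difference m).getD 0 : Nat)
    else
      let nearest := lst.foldl (fun acc x => if |n - x| = m then acc ++ [x] else acc) []
      match PySem.List.max? nearest (fun y => y) with
      | none => 0                                 -- unreachable: m occurs in difference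
      | some mx => ((PySem.List.index? lst mx).getD 0 : Nat)

-- ===== PORT B =====
-- the loop body of Source B ("keep the better (difference, value) candidate"), as a named helper
def pvStepB (n : Int) (acc : Option (Int × Int)) (x : Int) : Option (Int × Int) :=
  let d := |n - x|
  match acc with
  | none => some (d, x)
  | some (bd, bv) => if d < bd ∨ (d = bd ∧ bv < x) then some (d, x) else some (bd, bv)

def nearest_element_alt (n : Int) (lst : List Int) : Int :=
  let best := lst.foldl (pvStepB n) none
  match best with
  | none => 0                                     -- lst.index(None) raises: outside Pre_
  | some (_, bv) => ((PySem.List.index? lst bv).getD 0 : Nat)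

-- ===== PRECONDITION & SPEC =====
-- Pre_ excludes only the empty list, on which both Pythons raise ValueError.
def Pre_nearest_element (n : Int) (lst : List Int) : Prop := lst ≠ []
instance (n : Int) (lst : List Int) : Decidable (Pre_nearest_element n lst) := by
  unfold Pre_nearest_element; infer_instance
def pvWitness_nearest_element : Int × List Int := (2, [1, 3, 7])

def Spec_nearest_element (n : Int) (lst : List Int) (out : Int) : Prop := out = nearest_element_alt n lst
instance (n : Int) (lst : List Int) (out : Int) : Decidable (Spec_nearest_element n lst out) := by unfold Spec_nearest_element; infer_instance

-- ===== CLAIM (what is proved, stated in full; the proofs are below) =====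
def Claim_equal_nearest_element : Prop := ∀ (n : Int) (lst : List Int), Dom_nearest_element n lst → Pre_nearest_element n lst → Spec_nearest_element n lst (nearest_element n lst)

-- ===== LEMMAS AND PROOFS =====

-- the binary "keep the better candidate" step of B's fold, on plain pairs (diff, value)
def pvBetter (p q : Int × Int) : Int × Int :=
  if q.1 < p.1 ∨ (q.1 = p.1 ∧ p.2 < q.2) then q else p

def pvPair (n x : Int) : Int × Int := (|n - x|, x)

-- "r is at least as good as q": smaller diff, or equal diff and ≥ value
def pvRel (r q : Int × Int) : Prop := r.1 ≤ q.1 ∧ (q.1 = r.1 → q.2 ≤ r.2)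

theorem pvRel_refl (p : Int × Int) : pvRel p p := ⟨le_refl _, fun _ => le_refl _⟩

theorem pvRel_trans {a b c : Int × Int} (h1 : pvRel a b) (h2 : pvRel b c) : pvRel a c := by
  obtain ⟨l1, e1⟩ := h1; obtain ⟨l2, e2⟩ := h2
  exact ⟨le_trans l1 l2, fun h => le_trans (e2 (by omega)) (e1 (by omega))⟩

theorem pvBetter_rel_left (p q : Int × Int) : pvRel (pvBetter p q) p := by
  unfold pvBetter pvRel; split_ifs with h
  · exact ⟨by omega, fun hh => by omega⟩
  · exact pvRel_refl p

theorem pvBetter_rel_right (p q : Int × Int) : pvRel (pvBetter p q) q := by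
  unfold pvBetter pvRel; split_ifs with h
  · exact pvRel_refl q
  · push_neg at h; exact ⟨by omega, fun hh => by have := h.2 hh; omega⟩

theorem pvBetter_mem (p q : Int × Int) : pvBetter p q = p ∨ pvBetter p q = q := by
  unfold pvBetter; split_ifs <;> simp

-- B's fold, once started, is a fold of pvBetter over the pairs
theorem foldB_eq (n : Int) (t : List Int) : ∀ (p : Int × Int),
    t.foldl (pvStepB n) (some p)
    = some (t.foldl (fun r x => pvBetter r (pvPair n x)) p) := by
  induction t with
  | nil => intro p; rfl
  | cons x t ih =>
    rintro ⟨bd, bv⟩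
    simp only [List.foldl_cons, pvStepB]
    by_cases hc : |n - x| < bd ∨ (|n - x| = bd ∧ bv < x)
    · rw [if_pos hc, ih, show pvBetter (bd, bv) (pvPair n x) = (|n - x|, x) from by
        simp [pvBetter, pvPair, hc]]
    · rw [if_neg hc, ih, show pvBetter (bd, bv) (pvPair n x) = (bd, bv) from by
        simp [pvBetter, pvPair, hc]]

theorem foldB_mem (n : Int) (t : List Int) : ∀ (p : Int × Int),
    t.foldl (fun r x => pvBetter r (pvPair n x)) p ∈ p :: t.map (pvPair n) := by
  induction t with
  | nil => intro p; simp
  | cons x t ih =>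
    intro p
    simp only [List.foldl_cons, List.map_cons]
    have h := ih (pvBetter p (pvPair n x))
    rcases List.mem_cons.1 h with h2 | h2
    · rw [h2]
      rcases pvBetter_mem p (pvPair n x) with he | he <;> rw [he] <;> simp
    · exact List.mem_cons_of_mem _ (List.mem_cons_of_mem _ h2)

theorem foldB_min (n : Int) (t : List Int) : ∀ (p : Int × Int),
    ∀ q ∈ p :: t.map (pvPair n), pvRel (t.foldl (fun r x => pvBetter r (pvPair n x)) p) q := by
  induction t with
  | nil =>
    intro p q hq
    simp only [List.map_nil, List.mem_cons, List.not_mem_nil, or_false] at hq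
    subst hq
    exact pvRel_refl q
  | cons x t ih =>
    intro p q hq
    simp only [List.map_cons, List.mem_cons] at hq
    simp only [List.foldl_cons]
    have hbase : pvRel (t.foldl (fun r x => pvBetter r (pvPair n x)) (pvBetter p (pvPair n x)))
        (pvBetter p (pvPair n x)) :=
      ih (pvBetter p (pvPair n x)) _ (List.mem_cons_self ..)
    rcases hq with rfl | rfl | h
    · exact pvRel_trans hbase (pvBetter_rel_left _ _)
    · exact pvRel_trans hbase (pvBetter_rel_right _ _)
    · exact ih _ q (List.mem_cons_of_mem _ h)

-- everything the main proof needs about B's fold, phrased on the port's own lambda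
theorem foldB_spec (n x : Int) (t : List Int) :
    ∃ d0 v0, (x :: t).foldl (pvStepB n) none = some (d0, v0)
    ∧ (d0, v0) ∈ (x :: t).map (pvPair n)
    ∧ ∀ q ∈ (x :: t).map (pvPair n), pvRel (d0, v0) q := by
  have h0 : (x :: t).foldl (pvStepB n) none = t.foldl (pvStepB n) (some (pvPair n x)) := rfl
  rw [h0, foldB_eq]
  refine ⟨(t.foldl (fun r x => pvBetter r (pvPair n x)) (pvPair n x)).1,
          (t.foldl (fun r x => pvBetter r (pvPair n x)) (pvPair n x)).2,
          by rw [Prod.mk.eta], ?_, ?_⟩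
  · rw [Prod.mk.eta]
    simpa using foldB_mem n t (pvPair n x)
  · intro q hq
    rw [Prod.mk.eta]
    exact foldB_min n t (pvPair n x) q (by simpa using hq)

-- first-occurrence characterisation of index?, getElem form
theorem index?_eq_some_of_getElem {xs : List Int} {v : Int} {i : Nat} (hi : i < xs.length)
    (hv : xs[i] = v) (hfirst : ∀ j (hj : j < i), xs[j]'(by omega) ≠ v) :
    PySem.List.index? xs v = some i := by
  rw [PySem.List.index?_eq_some_iff]
  refine ⟨xs.take i, xs.drop (i + 1), ?_, by simp [hi.le], ?_⟩
  · conv_lhs => rw [← List.take_append_drop i xs]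
    congr 1
    rw [List.drop_eq_getElem_cons hi, hv]
  · intro hmem
    obtain ⟨j, hj, hjv⟩ := List.mem_iff_getElem.1 hmem
    have hji : j < i := by simpa [hi.le] using hj
    exact hfirst j hji (by simpa [List.getElem_take] using hjv)

-- two distinct positions with the same value force count ≥ 2
theorem two_le_count_of_two_getElem {xs : List Int} {v : Int} {i j : Nat} (hij : i ≠ j)
    (hi : i < xs.length) (hj : j < xs.length) (hiv : xs[i] = v) (hjv : xs[j] = v) :
    2 ≤ xs.count v := by
  rw [← List.duplicate_iff_two_le_count, List.duplicate_iff_exists_distinct_get]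
  rcases Nat.lt_or_ge i j with h | h
  · exact ⟨⟨i, hi⟩, ⟨j, hj⟩, by simpa using h, by simpa using hiv.symm, by simpa using hjv.symm⟩
  · exact ⟨⟨j, hj⟩, ⟨i, hi⟩, by simp; omega, by simpa using hjv.symm, by simpa using hiv.symm⟩

-- ===== VERDICT (by name: the statement is the Claim_ definition above) =====
theorem nearest_element_spec : Claim_equal_nearest_element := by
  intro n lst _ hpre
  unfold Spec_nearest_element nearest_element nearest_element_alt
  obtain ⟨x, t, rfl⟩ := List.exists_cons_of_ne_nil hpre
  obtain ⟨d0, v0, hfold, hmem, hmin⟩ := foldB_spec n x t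
  -- evaluate B
  rw [hfold]
  obtain ⟨y, hy, hyr⟩ := List.mem_map.1 hmem
  have hrmin : ∀ q ∈ (x :: t).map (pvPair n), pvRel (d0, v0) q := hmin
  set lst := x :: t with hlst
  set difference := lst.map (fun x => |n - x|) with hdiff
  -- A's min exists
  have hne : difference ≠ [] := by simp [hdiff, hlst]
  obtain ⟨m, hm⟩ : ∃ m, PySem.List.min? difference (fun y => y) = some m := by
    cases hmin' : PySem.List.min? difference (fun y => y) with
    | none => exact absurd ((PySem.List.min?_eq_none_iff _ _).1 hmin') hne
    | some m => exact ⟨m, rfl⟩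
  have hmmem : m ∈ difference := PySem.List.min?_mem hm
  have hmisMin : ∀ d ∈ difference, m ≤ d := fun d hd => PySem.List.min?_isMin hm d hd
  have hy0 : pvPair n y = (d0, v0) := hyr
  have hyv : y = v0 := congrArg Prod.snd hy0
  have hyd0 : |n - y| = d0 := congrArg Prod.fst hy0
  -- d0 = m
  have hr1 : d0 = m := by
    obtain ⟨z, hz, hzm⟩ := List.mem_map.1 hmmem
    have h1 : m ≤ d0 := by
      refine hmisMin d0 ?_
      rw [hdiff, List.mem_map]
      exact ⟨y, hy, hyd0⟩
    have h2 : d0 ≤ m := by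
      have := (hrmin (pvPair n z) (List.mem_map_of_mem hz)).1
      simpa [pvPair, hzm] using this
    omega
  have hyd : |n - y| = m := by rw [hyd0, hr1]
  simp only [hm]
  by_cases hcount : PySem.List.count difference m = 1
  · -- unique minimal difference: its position is also the unique position of the value v0 = y
    rw [if_pos hcount]
    obtain ⟨i, hi⟩ : ∃ i, PySem.List.index? difference m = some i :=
      Option.isSome_iff_exists.1 ((PySem.List.index?_isSome_iff _ _).2 hmmem)
    obtain ⟨hilt, hival, hifirst⟩ := PySem.List.getElem_of_index?_eq_some hi
    have hlen : difference.length = lst.length := by simp [hdiff]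
    obtain ⟨k, hk, hkv⟩ := List.mem_iff_getElem.1 hy
    have hkd : difference[k]'(by omega) = m := by
      simp only [hdiff, List.getElem_map]; rw [hkv, hyd]
    have hki : k = i := by
      by_contra hne'
      have := two_le_count_of_two_getElem hne' (by omega) hilt hkd hival
      rw [PySem.List.count_eq] at hcount; omega
    have hlsti : lst[i]'(by omega) = y := by subst hki; exact hkv
    have hidx : PySem.List.index? lst v0 = some i := by
      rw [← hyv]
      refine index?_eq_some_of_getElem (by omega) hlsti ?_
      intro j hj hjy
      refine hifirst j hj ?_
      simp only [hdiff, List.getElem_map]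
      rw [hjy, hyd]
    rw [hi, hidx]
  · -- tie on the minimal difference: A takes max(nearest); it equals B's tracked value v0
    rw [if_neg hcount]
    rw [show (fun (acc : List Int) (z : Int) => if |n - z| = m then acc ++ [z] else acc)
        = (fun acc z => if decide (|n - z| = m) = true then acc ++ [(fun w => w) z] else acc) from by
      funext acc z; simp]
    rw [PySem.List.foldl_append_if (fun z => decide (|n - z| = m)) (fun w => w) lst []]
    simp only [List.nil_append, List.map_id']
    set nr := lst.filter (fun z => decide (|n - z| = m)) with hnear
    have hyn : y ∈ nr := List.mem_filter.2 ⟨hy, by simp [hyd]⟩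
    obtain ⟨mx, hmx⟩ : ∃ mx, PySem.List.max? nr (fun y => y) = some mx := by
      cases hmax : PySem.List.max? nr (fun y => y) with
      | none =>
        exact absurd ((PySem.List.max?_eq_none_iff _ _).1 hmax) (List.ne_nil_of_mem hyn)
      | some mx => exact ⟨mx, rfl⟩
    have hmxmem := PySem.List.max?_mem hmx
    obtain ⟨hmxl, hmxd⟩ := List.mem_filter.1 hmxmem
    have hmxd' : |n - mx| = m := by simpa using hmxd
    have h1 : y ≤ mx := PySem.List.max?_isMax hmx y hyn
    have h2 : mx ≤ v0 := by
      have := (hrmin (pvPair n mx) (List.mem_map_of_mem hmxl)).2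
      simpa [pvPair, hmxd', hr1] using this
    have hmv : mx = v0 := by omega
    simp only [hmx, hmv]
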